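-- pv_equiv track=rewrite | github.com/teekuningas/notebooks | nb_merkitykset.py | format_cluster_contents
-- ===== SOURCE A (Python) =====
-- def format_cluster_contents(clusters, meanings):
--     cluster_dict = {}
--     for cluster_id, meaning in zip(clusters, meanings):
--         if cluster_id not in cluster_dict:
--             cluster_dict[cluster_id] = []
--         cluster_dict[cluster_id].append(meaning)
--
--     html = "<div style='max-height: 400px; overflow-y: auto;'>"
--     for cluster_id in sorted(cluster_dict.keys()):
--         items = cluster_dict[cluster_id]
--         html += f"<p><strong>Cluster {cluster_id}</strong> ({len(items)} items):<br>"
--         html += ", ".join([item['meaning'] for item in items])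
--         html += "</p>"
--     html += "</div>"
--     return html
-- ===== SOURCE B (Python) =====
-- def format_cluster_contents(clusters, meanings):
--     pairs = list(zip(clusters, meanings))
--     ids = sorted({c for c, _ in pairs})
--     parts = []
--     for cid in ids:
--         items = [m['meaning'] for c, m in pairs if c == cid]
--         parts.append(
--             f"<p><strong>Cluster {cid}</strong> ({len(items)} items):<br>"
--             + ", ".join(items) + "</p>")
--     return "<div style='max-height: 400px; overflow-y: auto;'>" + "".join(parts) + "</div>"
-- ===== Notes on version B (the rewrite author's own statement) =====
-- stated objective: simpler
-- what changed: B builds no dict-of-lists: it takes the sorted set of cluster ids and selects each cluster's meanings with one filter pass per id, joining the blocks at the end instead of accumulating a growing string.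
import Mathlib
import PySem

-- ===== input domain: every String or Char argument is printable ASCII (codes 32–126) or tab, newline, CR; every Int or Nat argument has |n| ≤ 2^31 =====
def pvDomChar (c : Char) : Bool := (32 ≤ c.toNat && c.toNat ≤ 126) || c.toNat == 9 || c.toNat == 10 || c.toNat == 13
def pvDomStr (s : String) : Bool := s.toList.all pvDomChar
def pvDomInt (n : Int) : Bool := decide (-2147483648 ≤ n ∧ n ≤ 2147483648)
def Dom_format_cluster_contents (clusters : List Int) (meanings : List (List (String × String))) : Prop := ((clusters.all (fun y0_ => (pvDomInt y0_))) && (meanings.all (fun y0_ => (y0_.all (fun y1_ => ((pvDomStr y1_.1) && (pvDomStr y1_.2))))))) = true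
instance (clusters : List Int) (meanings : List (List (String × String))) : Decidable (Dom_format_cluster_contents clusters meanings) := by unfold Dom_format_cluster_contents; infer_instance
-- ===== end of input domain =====

-- B groups by selecting each sorted cluster id's meanings with a filter pass (no dict-of-lists); objective: simpler.

-- ===== PORT A =====
-- item['meaning'] is ported as getD "meaning" ""; exact because Pre_ guarantees the key is present.
def format_cluster_contents (clusters : List Int) (meanings : List (List (String × String))) : String :=
  let cluster_dict : PySem.Dict Int (List (List (String × String))) :=
    (clusters.zip meanings).foldl (fun d p =>
      let d := if d.contains p.1 then d else d.insert p.1 []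
      d.insert p.1 (d.getD p.1 [] ++ [p.2])) PySem.Dict.empty
  let html := "<div style='max-height: 400px; overflow-y: auto;'>"
  let html := (PySem.List.sorted cluster_dict.keys (fun x => x) false).foldl (fun html cluster_id =>
      let items := cluster_dict.getD cluster_id []
      let html := html ++ "<p><strong>Cluster " ++ PySem.Int.toStr cluster_id ++ "</strong> (" ++ PySem.Int.toStr (items.length : Int) ++ " items):<br>"
      let html := html ++ PySem.Str.join ", " (items.map (fun item => (PySem.Dict.mk item).getD "meaning" ""))
      html ++ "</p>") html
  html ++ "</div>"

-- ===== PORT B =====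
-- m['meaning'] is ported as getD "meaning" ""; exact because Pre_ guarantees the key is present.
def format_cluster_contents_alt (clusters : List Int) (meanings : List (List (String × String))) : String :=
  let pairs := clusters.zip meanings
  let ids := PySem.List.sorted (PySem.Set.ofList (pairs.map Prod.fst)) (fun x => x) false
  let parts := ids.map (fun cid =>
    let items := (pairs.filter (fun p => p.1 == cid)).map (fun p => (PySem.Dict.mk p.2).getD "meaning" "")
    "<p><strong>Cluster " ++ PySem.Int.toStr cid ++ "</strong> (" ++ PySem.Int.toStr (items.length : Int) ++ " items):<br>" ++ PySem.Str.join ", " items ++ "</p>")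
  "<div style='max-height: 400px; overflow-y: auto;'>" ++ PySem.Str.join "" parts ++ "</div>"

-- ===== PRECONDITION & SPEC =====
-- Pre_ excludes inputs where some zipped meaning dict lacks the key 'meaning': there both A and B raise KeyError.
def Pre_format_cluster_contents (clusters : List Int) (meanings : List (List (String × String))) : Prop :=
  ∀ p ∈ clusters.zip meanings, (PySem.Dict.mk p.2).contains "meaning" = true
instance (clusters : List Int) (meanings : List (List (String × String))) : Decidable (Pre_format_cluster_contents clusters meanings) := by unfold Pre_format_cluster_contents; infer_instance
def pvWitness_format_cluster_contents : List Int × (List (List (String × String))) := ([1, 0, 1], [[("meaning", "a")], [("meaning", "b")], [("meaning", "c")]])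
def Spec_format_cluster_contents (clusters : List Int) (meanings : List (List (String × String))) (out : String) : Prop := out = format_cluster_contents_alt clusters meanings
instance (clusters : List Int) (meanings : List (List (String × String))) (out : String) : Decidable (Spec_format_cluster_contents clusters meanings out) := by unfold Spec_format_cluster_contents; infer_instance

-- ===== CLAIM (what is proved, stated in full; the proofs are below) =====
def Claim_equal_format_cluster_contents : Prop := ∀ (clusters : List Int) (meanings : List (List (String × String))), Dom_format_cluster_contents clusters meanings → Pre_format_cluster_contents clusters meanings → Spec_format_cluster_contents clusters meanings (format_cluster_contents clusters meanings)

-- ===== LEMMAS AND PROOFS =====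

-- A's grouping dict, as written in the port (proof helper)
def fccD (pairs : List (Int × List (String × String))) : PySem.Dict Int (List (List (String × String))) :=
  pairs.foldl (fun d p =>
    let d := if d.contains p.1 then d else d.insert p.1 []
    d.insert p.1 (d.getD p.1 [] ++ [p.2])) PySem.Dict.empty

-- the loop body of A's grouping fold is Dict.modify
theorem fcc_step (d : PySem.Dict Int (List (List (String × String)))) (p : Int × List (String × String)) :
    (let d' := if d.contains p.1 then d else d.insert p.1 [];
     d'.insert p.1 (d'.getD p.1 [] ++ [p.2])) = d.modify p.1 [] (· ++ [p.2]) := by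
  by_cases h : d.contains p.1 = true
  · simp [h, PySem.Dict.modify]
  · simp only [Bool.not_eq_true] at h
    simp only [h, Bool.false_eq_true, if_false, PySem.Dict.modify,
      PySem.Dict.getD_insert_self, PySem.Dict.insert_insert_self]
    rw [PySem.Dict.getD_of_not_contains]
    exact h

theorem fcc_join_nil : PySem.Str.join "" ([] : List String) = "" := by
  simp [PySem.Str.join, PySem.Chars.join_nil]

theorem fcc_join_cons (x : String) (xs : List String) :
    PySem.Str.join "" (x :: xs) = x ++ PySem.Str.join "" xs := by
  cases xs with
  | nil => simp [PySem.Str.join, PySem.Chars.join_singleton, PySem.Chars.join_nil]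
  | cons y t => simp [PySem.Str.join, PySem.Chars.join_cons_cons]

-- a string-accumulating loop is "".join of the blocks
theorem fcc_foldl_str (f : Int → String) : ∀ (l : List Int) (s : String),
    l.foldl (fun h k => h ++ f k) s = s ++ PySem.Str.join "" (l.map f) := by
  intro l
  induction l with
  | nil => intro s; simp [fcc_join_nil]
  | cons x t ih =>
      intro s
      simp only [List.foldl_cons, List.map_cons, fcc_join_cons, ih, String.append_assoc]

theorem fcc_core (pairs : List (Int × List (String × String))) :
    (PySem.List.sorted (fccD pairs).keys (fun x => x) false).foldl
        (fun html cluster_id =>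
          html ++ "<p><strong>Cluster " ++ PySem.Int.toStr cluster_id ++ "</strong> (" ++
            PySem.Int.toStr (((fccD pairs).getD cluster_id []).length : Int) ++ " items):<br>" ++
            PySem.Str.join ", " (((fccD pairs).getD cluster_id []).map
              (fun item => (PySem.Dict.mk item).getD "meaning" "")) ++ "</p>")
        "<div style='max-height: 400px; overflow-y: auto;'>"
      ++ "</div>"
    = "<div style='max-height: 400px; overflow-y: auto;'>" ++
      PySem.Str.join "" ((PySem.List.sorted (PySem.Set.ofList (pairs.map Prod.fst)) (fun x => x) false).map
        (fun cid =>
          "<p><strong>Cluster " ++ PySem.Int.toStr cid ++ "</strong> (" ++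
          PySem.Int.toStr ((((pairs.filter (fun p => p.1 == cid)).map
            (fun p => (PySem.Dict.mk p.2).getD "meaning" "")).length : Int)) ++ " items):<br>" ++
          PySem.Str.join ", " ((pairs.filter (fun p => p.1 == cid)).map
            (fun p => (PySem.Dict.mk p.2).getD "meaning" "")) ++ "</p>"))
      ++ "</div>" := by
  have hD : fccD pairs = pairs.foldl (fun d p => d.modify p.1 [] (· ++ [p.2])) PySem.Dict.empty := by
    unfold fccD
    apply PySem.List.foldl_congr_mem
    intro d p _
    exact fcc_step d p
  rw [hD]
  rw [PySem.Dict.keys_foldl_modify_key]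
  have hkeys : PySem.Set.update (PySem.Dict.empty : PySem.Dict Int (List (List (String × String)))).keys
        (pairs.map Prod.fst) = PySem.Set.ofList (pairs.map Prod.fst) := by
    simp [PySem.Set.update, PySem.Set.ofList]
  rw [hkeys]
  simp only [String.append_assoc]
  rw [fcc_foldl_str]
  simp only [String.append_assoc]
  congr 3
  apply List.map_congr_left
  intro k _
  rw [PySem.Dict.getD_foldl_modify_append]
  simp only [PySem.Dict.getD_empty, List.nil_append, List.map_map, List.length_map]
  rfl

-- ===== VERDICT (by name: the statement is the Claim_ definition above) =====
theorem format_cluster_contents_spec : Claim_equal_format_cluster_contents := by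
  intro clusters meanings _ _
  exact fcc_core (clusters.zip meanings)
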